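-- pv_equiv track=rewrite | github.com/angadsinghsandhu/Notes | Interview/LLD/Locker_Delivery_System.py | compute_distance_to_lockers
-- ===== SOURCE A (Python) =====
-- from collections import deque
--
-- def compute_distance_to_lockers(city, lockers):
--     """
--     Computes the Manhattan distance from each cell in the city grid to the nearest locker.
--
--     Parameters:
--     - city: A 2D list (m x n matrix) representing the city blocks.
--             (The values inside the matrix are not used, as the grid is defined by its dimensions.)
--     - lockers: A list of tuples (x, y) indicating the positions of the lockers.
--
--     Returns:
--     - A 2D list of the same dimensions where each cell contains the Manhattan distance to the nearest locker.
--
--     Assumptions: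
--     - The grid is 0-indexed.
--     - Movement is allowed only in four directions: up, down, left, right.
--     - Every cell is reachable and there are no obstacles.
--     """
--     if not city or not city[0]:
--         return []
--
--     m, n = len(city), len(city[0])
--     # Initialize all distances to -1 (indicating not yet computed)
--     distances = [[-1 for _ in range(n)] for _ in range(m)]
--     queue = deque()
--
--     # Step 1 (Clarification): We assume the lockers list contains valid positions within the grid.
--     # Step 2 (Assumptions): For each locker position, set the distance to 0.
--     for x, y in lockers:
--         if 0 <= x < m and 0 <= y < n:
--             distances[x][y] = 0
--             queue.append((x, y))
--
--     # Define movements: up, down, left, right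
--     directions = [(1, 0), (-1, 0), (0, 1), (0, -1)]
--
--     # Step 3 (Short-term fix): Multi-source BFS to fill in distances.
--     while queue:
--         x, y = queue.popleft()
--         for dx, dy in directions:
--             nx, ny = x + dx, y + dy
--             if 0 <= nx < m and 0 <= ny < n and distances[nx][ny] == -1:
--                 distances[nx][ny] = distances[x][y] + 1
--                 queue.append((nx, ny))
--
--     # Step 4 (Long-term fix): The system now provides a base that can be extended (e.g., handling obstacles).
--     return distances
-- ===== SOURCE B (Python) =====
-- def compute_distance_to_lockers(city, lockers):
--     """Closed-form re-implementation: on an obstacle-free grid the BFS distance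
--     is just the minimum Manhattan distance over the in-bounds lockers."""
--     if not city or not city[0]:
--         return []
--     m, n = len(city), len(city[0])
--     valid = [(x, y) for x, y in lockers if 0 <= x < m and 0 <= y < n]
--     if not valid:
--         return [[-1] * n for _ in range(m)]
--     return [[min(abs(i - x) + abs(j - y) for x, y in valid) for j in range(n)]
--             for i in range(m)]
-- ===== Notes on version B (the rewrite author's own statement) =====
-- stated objective: simpler
-- what changed: Replaces the multi-source BFS with a deque and a mutable distance grid by a direct closed form: each cell's value is the minimum Manhattan distance to an in-bounds locker (valid because the grid has no obstacles), with the same empty-grid and no-valid-locker corner results.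
import Mathlib
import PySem

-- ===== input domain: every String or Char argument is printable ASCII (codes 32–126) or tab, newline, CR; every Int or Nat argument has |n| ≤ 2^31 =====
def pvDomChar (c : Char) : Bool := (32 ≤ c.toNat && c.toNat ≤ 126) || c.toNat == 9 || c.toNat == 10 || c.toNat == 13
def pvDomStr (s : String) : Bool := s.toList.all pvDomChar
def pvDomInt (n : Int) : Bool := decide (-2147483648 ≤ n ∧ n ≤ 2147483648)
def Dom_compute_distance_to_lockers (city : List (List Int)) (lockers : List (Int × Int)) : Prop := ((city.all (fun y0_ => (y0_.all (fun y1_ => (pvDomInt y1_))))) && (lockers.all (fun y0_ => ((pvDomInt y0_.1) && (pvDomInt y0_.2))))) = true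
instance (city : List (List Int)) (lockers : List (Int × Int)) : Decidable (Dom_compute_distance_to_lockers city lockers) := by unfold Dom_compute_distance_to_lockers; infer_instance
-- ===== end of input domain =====

-- B replaces A's multi-source BFS by the closed form "minimum Manhattan distance to an
-- in-bounds locker" (exact here because the grid has no obstacles); objective: simpler.

-- ===== PORT A =====
-- A mutates a freshly allocated `distances` grid; the port models that grid as a
-- function (Int × Int) → Int updated functionally and reads it out row by row at the end.

-- The four movement directions, in A's order.
def pvDirs : List (Int × Int) := [(1, 0), (-1, 0), (0, 1), (0, -1)]

-- The four neighbour cells of `c`, in direction order (used to state loop lemmas).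
def pvNbrs (c : Int × Int) : List (Int × Int) := pvDirs.map (fun d => (c.1 + d.1, c.2 + d.2))

-- One step of A's inner `for dx, dy in directions` loop: if the neighbour is in bounds
-- and unvisited, set its distance to v + 1 and append it to the queue.
def pvRelax (m n v : Int) (s : ((Int × Int) → Int) × List (Int × Int)) (t : Int × Int) :
    ((Int × Int) → Int) × List (Int × Int) :=
  if 0 ≤ t.1 ∧ t.1 < m ∧ t.2 ≥ 0 ∧ t.2 < n ∧ s.1 t = -1 then
    (fun c => if c = t then v + 1 else s.1 c, s.2 ++ [t])
  else s

-- A's locker-initialisation loop: distances[x][y] := 0 and enqueue, for in-bounds lockers.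
def pvInit (m n : Int) (lockers : List (Int × Int)) :
    ((Int × Int) → Int) × List (Int × Int) :=
  lockers.foldl
    (fun s p =>
      if 0 ≤ p.1 ∧ p.1 < m ∧ 0 ≤ p.2 ∧ p.2 < n then
        (fun c => if c = p then 0 else s.1 c, s.2 ++ [p])
      else s)
    ((fun _ => -1), [])

-- guard of pvRelax as a Bool predicate (for loop-shape lemmas)
def pvOk (m n : Int) (D : (Int × Int) → Int) (t : Int × Int) : Bool :=
  decide (0 ≤ t.1 ∧ t.1 < m ∧ t.2 ≥ 0 ∧ t.2 < n ∧ D t = -1)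

-- the grid's cells (for the termination measure)
def pvGrid (m n : Int) : List (Int × Int) :=
  ((List.range m.toNat) ×ˢ (List.range n.toNat)).map (fun p => ((p.1 : Int), (p.2 : Int)))

def pvUncount (m n : Int) (D : (Int × Int) → Int) : Nat :=
  (pvGrid m n).countP (fun c => decide (D c = -1))

-- lemmas cited by pvBFS's own hD argument and termination proof
theorem pvNbrs_nodup (c : Int × Int) : (pvNbrs c).Nodup := by
  simp [pvNbrs, pvDirs, Prod.ext_iff]

theorem pvRelax_foldl (m n v : Int) (ts : List (Int × Int)) (hts : ts.Nodup)
    (D : (Int × Int) → Int) (Q : List (Int × Int)) :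
    ts.foldl (pvRelax m n v) (D, Q) =
      (fun c => if c ∈ ts.filter (pvOk m n D) then v + 1 else D c,
       Q ++ ts.filter (pvOk m n D)) := by
  induction ts generalizing D Q with
  | nil => simp
  | cons t ts ih =>
    have hnd := List.nodup_cons.1 hts
    rw [List.foldl_cons]
    by_cases hok : pvOk m n D t = true
    · have hrel : pvRelax m n v (D, Q) t =
          (fun c => if c = t then v + 1 else D c, Q ++ [t]) := by
        simp only [pvRelax]
        rw [if_pos]
        simpa [pvOk] using hok
      rw [hrel, ih hnd.2]
      have hfeq : (ts.filter (pvOk m n (fun c => if c = t then v + 1 else D c))) =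
          ts.filter (pvOk m n D) := by
        apply List.filter_congr
        intro x hx
        have hxt : x ≠ t := fun h => hnd.1 (h ▸ hx)
        simp [pvOk, hxt]
      rw [hfeq]
      have hfc : (t :: ts).filter (pvOk m n D) = t :: ts.filter (pvOk m n D) := by
        simp [List.filter_cons, hok]
      rw [hfc]
      refine Prod.ext ?_ ?_
      · funext c
        by_cases hc : c ∈ ts.filter (pvOk m n D)
        · have hct : c ≠ t := fun h => hnd.1 (h ▸ (List.mem_filter.1 hc).1)
          simp [hc, List.mem_cons, hct]
        · by_cases hct : c = t
          · subst hct; simp [hc]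
          · simp [hc, hct]
      · simp
    · have hrel : pvRelax m n v (D, Q) t = (D, Q) := by
        simp only [pvRelax]
        rw [if_neg]
        simpa [pvOk] using hok
      rw [hrel, ih hnd.2]
      have hfc : (t :: ts).filter (pvOk m n D) = ts.filter (pvOk m n D) := by
        simp [List.filter_cons, hok]
      rw [hfc]

theorem pvStep_eq (m n v : Int) (c : Int × Int) (D : (Int × Int) → Int) (Q : List (Int × Int)) :
    pvDirs.foldl (fun st d => pvRelax m n v st (c.1 + d.1, c.2 + d.2)) (D, Q) =
      (fun c' => if c' ∈ (pvNbrs c).filter (pvOk m n D) then v + 1 else D c',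
       Q ++ (pvNbrs c).filter (pvOk m n D)) := by
  have h := pvRelax_foldl m n v (pvNbrs c) (pvNbrs_nodup c) D Q
  simp only [pvNbrs, pvDirs, List.map_cons, List.map_nil, List.foldl_cons, List.foldl_nil] at h ⊢
  exact h

theorem pvGrid_nodup (m n : Int) : (pvGrid m n).Nodup := by
  refine ((List.nodup_range).product (List.nodup_range)).map ?_
  intro a b h
  simp only [Prod.mk.injEq] at h
  exact Prod.ext (by exact_mod_cast h.1) (by exact_mod_cast h.2)

theorem pvGrid_mem (m n : Int) (c : Int × Int) :
    c ∈ pvGrid m n ↔ 0 ≤ c.1 ∧ c.1 < m ∧ 0 ≤ c.2 ∧ c.2 < n := by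
  simp only [pvGrid, List.mem_map]
  constructor
  · rintro ⟨p, hp, rfl⟩
    have := List.mem_product.1 hp
    simp only [List.mem_range] at this
    simp only
    omega
  · rintro ⟨h1, h2, h3, h4⟩
    refine ⟨(c.1.toNat, c.2.toNat), List.mem_product.2 ⟨?_, ?_⟩, ?_⟩
    · simp only [List.mem_range]; omega
    · simp only [List.mem_range]; omega
    · cases c; simp only [Prod.mk.injEq]; constructor <;> omega

theorem pvCountP_override (l : List (Int × Int)) (hl : l.Nodup) (T : List (Int × Int))
    (hT : T.Nodup) (hsub : ∀ t ∈ T, t ∈ l) (D D' : (Int × Int) → Int)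
    (hflip : ∀ t ∈ T, D t = -1 ∧ ¬(D' t = -1)) (hsame : ∀ x ∈ l, x ∉ T → D' x = D x) :
    l.countP (fun c => decide (D' c = -1)) + T.length ≤ l.countP (fun c => decide (D c = -1)) := by
  induction T generalizing l with
  | nil =>
    have : l.countP (fun c => decide (D' c = -1)) = l.countP (fun c => decide (D c = -1)) := by
      apply List.countP_congr
      intro x hx
      simp [hsame x hx (List.not_mem_nil)]
    simp only [List.length_nil, Nat.add_zero]
    exact le_of_eq this
  | cons t T' ih =>
    have htl : t ∈ l := hsub t List.mem_cons_self
    have hTnd := List.nodup_cons.1 hT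
    have hperm := List.perm_cons_erase htl
    rw [hperm.countP_eq (fun c => decide (D' c = -1)), hperm.countP_eq (fun c => decide (D c = -1))]
    have hft := hflip t List.mem_cons_self
    have hrec := ih (l.erase t) (hl.erase t) hTnd.2
      (fun t' ht' => List.mem_erase_of_ne (fun h => hTnd.1 (by rw [h] at ht'; exact ht')) |>.mpr (hsub t' (List.mem_cons_of_mem t ht')))
      (fun t' ht' => hflip t' (List.mem_cons_of_mem t ht'))
      (fun x hx hxT => hsame x (List.mem_of_mem_erase hx)
        (by
          intro hmem
          rcases List.mem_cons.1 hmem with h | h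
          · exact hl.not_mem_erase (h ▸ hx)
          · exact hxT h))
    simp only [List.countP_cons, List.length_cons]
    have h1 : (decide (D' t = -1)) = false := by simpa using hft.2
    have h2 : (decide (D t = -1)) = true := by simpa using hft.1
    rw [h1, h2]
    simp only [Bool.false_eq_true, if_false, if_true]
    omega

theorem pvMeasure_dec (m n v : Int) (hv : -1 ≤ v) (D : (Int × Int) → Int)
    (T : List (Int × Int)) (hT : T.Nodup) (hok : ∀ t ∈ T, pvOk m n D t = true) :
    pvUncount m n (fun c' => if c' ∈ T then v + 1 else D c') + T.length ≤ pvUncount m n D := by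
  refine pvCountP_override _ (pvGrid_nodup m n) T hT ?_ _ _ ?_ ?_
  · intro t ht
    have := hok t ht
    simp only [pvOk, decide_eq_true_eq] at this
    exact (pvGrid_mem m n t).2 ⟨this.1, this.2.1, this.2.2.1, this.2.2.2.1⟩
  · intro t ht
    have := hok t ht
    simp only [pvOk, decide_eq_true_eq] at this
    refine ⟨this.2.2.2.2, ?_⟩
    simp only [if_pos ht]; omega
  · intro x _ hx; simp [if_neg hx]

-- A's `while queue` loop. The hypothesis hD (every stored distance is ≥ -1) is a proof
-- argument only used for termination; it is erased at runtime.
def pvBFS (m n : Int) (D : (Int × Int) → Int) (Q : List (Int × Int))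
    (hD : ∀ c, -1 ≤ D c) : (Int × Int) → Int :=
  match Q with
  | [] => D
  | c :: Q' =>
    let v := D c
    pvBFS m n
      (pvDirs.foldl (fun st d => pvRelax m n v st (c.1 + d.1, c.2 + d.2)) (D, Q')).1
      (pvDirs.foldl (fun st d => pvRelax m n v st (c.1 + d.1, c.2 + d.2)) (D, Q')).2
      (by
        rw [pvStep_eq]
        intro c'
        by_cases h : c' ∈ (pvNbrs c).filter (pvOk m n D)
        · simp only [if_pos h]; have := hD c; omega
        · simp only [if_neg h]; exact hD c')
  termination_by Q.length + 2 * pvUncount m n D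
  decreasing_by
    rw [pvStep_eq]
    have hdec := pvMeasure_dec m n (D c) (hD c) D ((pvNbrs c).filter (pvOk m n D))
      ((pvNbrs_nodup c).filter _) (fun t ht => (List.mem_filter.1 ht).2)
    simp only [List.length_append, List.length_cons]
    omega

theorem pvInit_ge (m n : Int) (lockers : List (Int × Int)) :
    ∀ c, -1 ≤ (pvInit m n lockers).1 c := by
  have key : ∀ (ls : List (Int × Int)) (D : (Int × Int) → Int) (Q : List (Int × Int)),
      (∀ c, -1 ≤ D c) → ∀ c, -1 ≤ (ls.foldl
        (fun (s : ((Int × Int) → Int) × List (Int × Int)) (p : Int × Int) =>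
          if 0 ≤ p.1 ∧ p.1 < m ∧ 0 ≤ p.2 ∧ p.2 < n then
            (fun c => if c = p then 0 else s.1 c, s.2 ++ [p])
          else s) (D, Q)).1 c := by
    intro ls
    induction ls with
    | nil => intro D Q hD c; exact hD c
    | cons p ls ih =>
      intro D Q hD c
      rw [List.foldl_cons]
      by_cases hp : 0 ≤ p.1 ∧ p.1 < m ∧ 0 ≤ p.2 ∧ p.2 < n
      · rw [if_pos hp]
        exact ih _ _ (fun c' => by by_cases h : c' = p <;> simp [h] <;> exact hD c') c
      · rw [if_neg hp]
        exact ih D Q hD c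
  exact key lockers _ [] (fun _ => le_refl _)

def compute_distance_to_lockers (city : List (List Int)) (lockers : List (Int × Int)) :
    List (List Int) :=
  match city with
  | [] => []
  | r0 :: _ =>
    if r0 = [] then []
    else
      let m : Int := (city.length : Int)
      let n : Int := (r0.length : Int)
      let s := pvInit m n lockers
      let Df := pvBFS m n s.1 s.2 (pvInit_ge m n lockers)
      (List.range m.toNat).map (fun (i : Nat) =>
        (List.range n.toNat).map (fun (j : Nat) => Df ((i : Int), (j : Int))))

-- ===== PORT B =====
-- min(abs(i - x) + abs(j - y) for x, y in valid): Python's min over a nonempty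
-- sequence = fold of min from the first element ([] case is unreachable in the port).
def pvMinDist (valid : List (Int × Int)) (c : Int × Int) : Int :=
  match valid with
  | [] => -1
  | p :: rest =>
    rest.foldl (fun a q => min a (|c.1 - q.1| + |c.2 - q.2|)) (|c.1 - p.1| + |c.2 - p.2|)

def compute_distance_to_lockers_alt (city : List (List Int)) (lockers : List (Int × Int)) :
    List (List Int) :=
  match city with
  | [] => []
  | r0 :: _ =>
    if r0 = [] then []
    else
      let m : Int := (city.length : Int)
      let n : Int := (r0.length : Int)
      let valid := lockers.filter (fun p => decide (0 ≤ p.1 ∧ p.1 < m ∧ 0 ≤ p.2 ∧ p.2 < n))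
      if valid = [] then List.replicate m.toNat (List.replicate n.toNat (-1))
      else
        (List.range m.toNat).map (fun (i : Nat) =>
          (List.range n.toNat).map (fun (j : Nat) => pvMinDist valid ((i : Int), (j : Int))))

-- ===== PRECONDITION & SPEC =====
def Spec_compute_distance_to_lockers (city : List (List Int)) (lockers : List (Int × Int)) (out : List (List Int)) : Prop := out = compute_distance_to_lockers_alt city lockers
instance (city : List (List Int)) (lockers : List (Int × Int)) (out : List (List Int)) : Decidable (Spec_compute_distance_to_lockers city lockers out) := by unfold Spec_compute_distance_to_lockers; infer_instance

-- ===== CLAIM (what is proved, stated in full; the proofs are below) =====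
def Claim_equal_compute_distance_to_lockers : Prop := ∀ (city : List (List Int)) (lockers : List (Int × Int)), Dom_compute_distance_to_lockers city lockers → Spec_compute_distance_to_lockers city lockers (compute_distance_to_lockers city lockers)

-- ===== LEMMAS AND PROOFS =====

-- in-bounds predicate (proof-side abbreviation for the guards both ports write out)
def pvInb (m n : Int) (c : Int × Int) : Prop := 0 ≤ c.1 ∧ c.1 < m ∧ 0 ≤ c.2 ∧ c.2 < n


-- ---- facts about pvMinDist (fold of min) ----

theorem pvFoldlMin_le_init (f : (Int × Int) → Int) (l : List (Int × Int)) (a : Int) :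
    l.foldl (fun b q => min b (f q)) a ≤ a := by
  induction l generalizing a with
  | nil => simp
  | cons p l ih => exact le_trans (ih _) (min_le_left _ _)

theorem pvFoldlMin_le_mem (f : (Int × Int) → Int) (l : List (Int × Int)) (a : Int)
    (q : Int × Int) (hq : q ∈ l) : l.foldl (fun b q => min b (f q)) a ≤ f q := by
  induction l generalizing a with
  | nil => simp at hq
  | cons p l ih =>
    rcases List.mem_cons.1 hq with h | h
    · subst h; exact le_trans (pvFoldlMin_le_init f l _) (min_le_right _ _)
    · exact ih _ h

theorem pvFoldlMin_mem (f : (Int × Int) → Int) (l : List (Int × Int)) (a : Int) :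
    l.foldl (fun b q => min b (f q)) a = a ∨ ∃ q ∈ l, l.foldl (fun b q => min b (f q)) a = f q := by
  induction l generalizing a with
  | nil => left; rfl
  | cons p l ih =>
    rcases ih (min a (f p)) with h | ⟨q, hq, h⟩
    · rcases min_cases a (f p) with ⟨hm, _⟩ | ⟨hm, _⟩
      · left; rw [List.foldl_cons, h, hm]
      · right; exact ⟨p, List.mem_cons_self, by rw [List.foldl_cons, h, hm]⟩
    · right; exact ⟨q, List.mem_cons_of_mem _ hq, h⟩

theorem pvMinDist_le (valid : List (Int × Int)) (c q : Int × Int) (hq : q ∈ valid) :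
    pvMinDist valid c ≤ |c.1 - q.1| + |c.2 - q.2| := by
  match valid with
  | [] => simp at hq
  | p :: rest =>
    rcases List.mem_cons.1 hq with h | h
    · subst h; exact pvFoldlMin_le_init _ rest _
    · exact pvFoldlMin_le_mem _ rest _ q h

theorem pvMinDist_exists (valid : List (Int × Int)) (c : Int × Int) (h : valid ≠ []) :
    ∃ q ∈ valid, pvMinDist valid c = |c.1 - q.1| + |c.2 - q.2| := by
  match valid with
  | [] => exact absurd rfl h
  | p :: rest =>
    rcases pvFoldlMin_mem (fun q => |c.1 - q.1| + |c.2 - q.2|) rest (|c.1 - p.1| + |c.2 - p.2|) with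
      hm | ⟨q, hq, hm⟩
    · exact ⟨p, List.mem_cons_self, hm⟩
    · exact ⟨q, List.mem_cons_of_mem _ hq, hm⟩

theorem pvMinDist_nonneg (valid : List (Int × Int)) (c : Int × Int) (h : valid ≠ []) :
    0 ≤ pvMinDist valid c := by
  obtain ⟨q, _, hq⟩ := pvMinDist_exists valid c h
  have h1 := abs_nonneg (c.1 - q.1)
  have h2 := abs_nonneg (c.2 - q.2)
  omega

theorem pvMinDist_zero (valid : List (Int × Int)) (c : Int × Int) (h : valid ≠ [])
    (h0 : pvMinDist valid c = 0) : c ∈ valid := by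
  obtain ⟨q, hq, hm⟩ := pvMinDist_exists valid c h
  have h1 := abs_nonneg (c.1 - q.1)
  have h2 := abs_nonneg (c.2 - q.2)
  have e1 : |c.1 - q.1| = 0 := by omega
  have e2 : |c.2 - q.2| = 0 := by omega
  have : c = q := by
    cases c; cases q
    simp only [Prod.mk.injEq]
    constructor <;> [skip; skip] <;>
      · simp only [abs_eq_zero, sub_eq_zero] at e1 e2
        first | exact e1 | exact e2
  exact this ▸ hq

theorem pvMinDist_lipschitz (valid : List (Int × Int)) (c t : Int × Int) (h : valid ≠ []) :
    pvMinDist valid t ≤ pvMinDist valid c + (|t.1 - c.1| + |t.2 - c.2|) := by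
  obtain ⟨q, hq, hm⟩ := pvMinDist_exists valid c h
  have hle := pvMinDist_le valid t q hq
  have t1 : |t.1 - q.1| ≤ |t.1 - c.1| + |c.1 - q.1| := abs_sub_le _ _ _
  have t2 : |t.2 - q.2| ≤ |t.2 - c.2| + |c.2 - q.2| := abs_sub_le _ _ _
  omega

-- a unit step towards a nearest locker: both directions of adjacency recorded
theorem pvMd_step (valid : List (Int × Int)) (m n : Int)
    (hLin : ∀ q ∈ valid, pvInb m n q) (hLne : valid ≠ [])
    (c : Int × Int) (hc : pvInb m n c) (hpos : 0 < pvMinDist valid c) :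
    ∃ u : Int × Int, (∃ d ∈ pvDirs, u = (c.1 + d.1, c.2 + d.2)) ∧
      (∃ d ∈ pvDirs, c = (u.1 + d.1, u.2 + d.2)) ∧
      pvInb m n u ∧ pvMinDist valid u = pvMinDist valid c - 1 := by
  obtain ⟨q, hq, hm⟩ := pvMinDist_exists valid c hLne
  obtain ⟨hq1, hq2, hq3, hq4⟩ := hLin q hq
  obtain ⟨hc1, hc2, hc3, hc4⟩ := hc
  have habs1 := abs_cases (c.1 - q.1)
  have habs2 := abs_cases (c.2 - q.2)
  have hmain : ∃ u : Int × Int, (∃ d ∈ pvDirs, u = (c.1 + d.1, c.2 + d.2)) ∧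
      (∃ d ∈ pvDirs, c = (u.1 + d.1, u.2 + d.2)) ∧
      pvInb m n u ∧ |u.1 - q.1| + |u.2 - q.2| = |c.1 - q.1| + |c.2 - q.2| - 1 := by
    by_cases h1 : c.1 < q.1
    · refine ⟨(c.1 + 1, c.2), ⟨(1, 0), by simp [pvDirs], by simp⟩,
        ⟨(-1, 0), by simp [pvDirs], by simp [Prod.ext_iff]; try omega⟩,
        ⟨(by omega : (0:Int) ≤ c.1 + 1), (by omega : c.1 + 1 < m), hc3, hc4⟩, ?_⟩
      have e1 := abs_cases (c.1 + 1 - q.1)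
      simp only
      omega
    · by_cases h2 : q.1 < c.1
      · refine ⟨(c.1 - 1, c.2), ⟨(-1, 0), by simp [pvDirs], by simp [Prod.ext_iff]; try omega⟩,
          ⟨(1, 0), by simp [pvDirs], by simp [Prod.ext_iff]; try omega⟩,
          ⟨(by omega : (0:Int) ≤ c.1 - 1), (by omega : c.1 - 1 < m), hc3, hc4⟩, ?_⟩
        have e1 := abs_cases (c.1 - 1 - q.1)
        simp only
        omega
      · by_cases h3 : c.2 < q.2
        · refine ⟨(c.1, c.2 + 1), ⟨(0, 1), by simp [pvDirs], by simp [Prod.ext_iff]; try omega⟩,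
            ⟨(0, -1), by simp [pvDirs], by simp [Prod.ext_iff]; try omega⟩,
            ⟨hc1, hc2, (by omega : (0:Int) ≤ c.2 + 1), (by omega : c.2 + 1 < n)⟩, ?_⟩
          have e2 := abs_cases (c.2 + 1 - q.2)
          simp only
          omega
        · have h4 : q.2 < c.2 := by omega
          refine ⟨(c.1, c.2 - 1), ⟨(0, -1), by simp [pvDirs], by simp [Prod.ext_iff]; try omega⟩,
            ⟨(0, 1), by simp [pvDirs], by simp [Prod.ext_iff]; try omega⟩,
            ⟨hc1, hc2, (by omega : (0:Int) ≤ c.2 - 1), (by omega : c.2 - 1 < n)⟩, ?_⟩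
          have e2 := abs_cases (c.2 - 1 - q.2)
          simp only
          omega
  obtain ⟨u, hu1, hu2, hu3, hu4⟩ := hmain
  refine ⟨u, hu1, hu2, hu3, le_antisymm ?_ ?_⟩
  · have := pvMinDist_le valid u q hq
    omega
  · have hlip := pvMinDist_lipschitz valid u c hLne
    obtain ⟨d, hd, hdu⟩ := hu1
    have hd1 : |c.1 - u.1| + |c.2 - u.2| = 1 := by
      subst hdu
      simp only [pvDirs, List.mem_cons, List.not_mem_nil, or_false] at hd
      rcases hd with h | h | h | h <;> subst h <;> simp
    omega

-- the BFS loop invariant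
def pvInv (L : List (Int × Int)) (m n : Int)
    (D : (Int × Int) → Int) (Q : List (Int × Int)) : Prop :=
  (∀ c ∈ L, D c = 0) ∧
  (∀ c, D c ≠ -1 → pvInb m n c ∧ 0 ≤ D c ∧ pvMinDist L c ≤ D c) ∧
  (∀ c, D c ≠ -1 → c ∉ Q → ∀ d ∈ pvDirs, pvInb m n (c.1 + d.1, c.2 + d.2) →
     D (c.1 + d.1, c.2 + d.2) ≠ -1 ∧ D (c.1 + d.1, c.2 + d.2) ≤ D c + 1) ∧
  (∀ c ∈ Q, D c ≠ -1) ∧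
  Q.Pairwise (fun a b => D a ≤ D b ∧ D b ≤ D a + 1) ∧
  (∀ c, D c ≠ -1 → ∀ h ∈ Q, D c ≤ D h + 1)

theorem pvDirs_unit (c0 : Int × Int) (d : Int × Int) (hd : d ∈ pvDirs) :
    |(c0.1 + d.1) - c0.1| + |(c0.2 + d.2) - c0.2| = 1 := by
  simp only [pvDirs, List.mem_cons, List.not_mem_nil, or_false] at hd
  rcases hd with h | h | h | h <;> subst h <;> simp

theorem pvInv_step (L : List (Int × Int)) (m n : Int)
    (hLin : ∀ q ∈ L, pvInb m n q) (hLne : L ≠ [])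
    (D : (Int × Int) → Int) (c0 : Int × Int) (Q' : List (Int × Int))
    (hinv : pvInv L m n D (c0 :: Q')) :
    pvInv L m n (fun c' => if c' ∈ (pvNbrs c0).filter (pvOk m n D) then D c0 + 1 else D c')
      (Q' ++ (pvNbrs c0).filter (pvOk m n D)) := by
  obtain ⟨i1, i2, i3, i4, i5, i6⟩ := hinv
  set T := (pvNbrs c0).filter (pvOk m n D) with hTdef
  have hc0 : D c0 ≠ -1 := i4 c0 List.mem_cons_self
  obtain ⟨hc0in, hc0nn, hc0md⟩ := i2 c0 hc0
  have hTmem : ∀ t ∈ T, pvInb m n t ∧ D t = -1 ∧ ∃ d ∈ pvDirs, t = (c0.1 + d.1, c0.2 + d.2) := by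
    intro t ht
    obtain ⟨htn, htok⟩ := List.mem_filter.1 ht
    simp only [pvOk, decide_eq_true_eq] at htok
    obtain ⟨d, hd, hdt⟩ := List.mem_map.1 htn
    exact ⟨⟨htok.1, htok.2.1, htok.2.2.1, htok.2.2.2.1⟩, htok.2.2.2.2, d, hd, hdt.symm⟩
  have hvisT : ∀ c, D c ≠ -1 → c ∉ T := fun c hc hmem => hc (hTmem c hmem).2.1
  have hhead : ∀ a ∈ Q', D c0 ≤ D a ∧ D a ≤ D c0 + 1 := (List.pairwise_cons.1 i5).1
  have i5' : Q'.Pairwise (fun a b => D a ≤ D b ∧ D b ≤ D a + 1) := (List.pairwise_cons.1 i5).2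
  refine ⟨?_, ?_, ?_, ?_, ?_, ?_⟩
  · -- lockers stay 0
    intro c hc
    have h0 := i1 c hc
    have : c ∉ T := hvisT c (by omega)
    simp only [if_neg this]
    exact h0
  · -- visited cells: in bounds, nonnegative, ≥ Manhattan minimum
    intro c hc
    by_cases hcT : c ∈ T
    · obtain ⟨hinb, _, d, hd, hdt⟩ := hTmem c hcT
      simp only [if_pos hcT]
      refine ⟨hinb, by omega, ?_⟩
      have hlip := pvMinDist_lipschitz L c0 c hLne
      have hunit : |c.1 - c0.1| + |c.2 - c0.2| = 1 := by
        rw [hdt]; exact pvDirs_unit c0 d hd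
      omega
    · simp only [if_neg hcT] at hc ⊢
      exact i2 c hc
  · -- processed cells: neighbours visited with value ≤ value + 1
    intro c hc hcQ d hd hinbU
    have hcT : c ∉ T := fun h => hcQ (List.mem_append.2 (Or.inr h))
    have hcQ' : c ∉ Q' := fun h => hcQ (List.mem_append.2 (Or.inl h))
    simp only [if_neg hcT] at hc ⊢
    by_cases hceq : c = c0
    · subst hceq
      have humem : (c.1 + d.1, c.2 + d.2) ∈ pvNbrs c := List.mem_map.2 ⟨d, hd, rfl⟩
      by_cases huT : (c.1 + d.1, c.2 + d.2) ∈ T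
      · simp only [if_pos huT]
        exact ⟨by omega, le_refl _⟩
      · have hok : ¬(pvOk m n D (c.1 + d.1, c.2 + d.2) = true) := by
          intro h
          exact huT (List.mem_filter.2 ⟨humem, h⟩)
        simp only [pvOk, decide_eq_true_eq] at hok
        obtain ⟨u1, u2, u3, u4⟩ := hinbU
        have hune : D (c.1 + d.1, c.2 + d.2) ≠ -1 := by tauto
        simp only [if_neg (hvisT _ hune)]
        exact ⟨hune, i6 _ hune c List.mem_cons_self⟩
    · have hcold : c ∉ c0 :: Q' := by
        intro h
        rcases List.mem_cons.1 h with h | h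
        · exact hceq h
        · exact hcQ' h
      have h3 := i3 c hc hcold d hd hinbU
      simp only [if_neg (hvisT _ h3.1)]
      exact h3
  · -- queue members are visited
    intro c hcm
    rcases List.mem_append.1 hcm with h | h
    · have := i4 c (List.mem_cons_of_mem _ h)
      simp only [if_neg (hvisT c this)]
      exact this
    · simp only [if_pos h]
      omega
  · -- queue values nondecreasing, within +1
    refine List.pairwise_append.2 ⟨?_, ?_, ?_⟩
    · refine i5'.imp_of_mem ?_
      intro a b ha hb hab
      have hva := i4 a (List.mem_cons_of_mem _ ha)
      have hvb := i4 b (List.mem_cons_of_mem _ hb)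
      simp only [if_neg (hvisT a hva), if_neg (hvisT b hvb)]
      exact hab
    · refine List.pairwise_of_forall_mem_list ?_
      intro a ha b hb
      simp only [if_pos ha, if_pos hb]
      omega
    · intro a ha b hb
      have hva := i4 a (List.mem_cons_of_mem _ ha)
      have hha := hhead a ha
      simp only [if_neg (hvisT a hva), if_pos hb]
      omega
  · -- every stored value ≤ any queue value + 1
    intro c hc h hmem
    have hcle : (if c ∈ T then D c0 + 1 else D c) ≤ D c0 + 1 := by
      by_cases hcT : c ∈ T
      · simp only [if_pos hcT]; exact le_refl _
      · simp only [if_neg hcT] at hc ⊢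
        exact i6 c hc c0 List.mem_cons_self
    simp only at hcle ⊢
    rcases List.mem_append.1 hmem with hh | hh
    · have hvh := i4 h (List.mem_cons_of_mem _ hh)
      have hhh := hhead h hh
      simp only [if_neg (hvisT h hvh)]
      omega
    · simp only [if_pos hh]
      omega

theorem pvBFS_congr (m n : Int) (D D' : (Int × Int) → Int) (Q Q' : List (Int × Int))
    (hDe : D = D') (hQe : Q = Q') (hD : ∀ c, -1 ≤ D c) (hD' : ∀ c, -1 ≤ D' c) :
    pvBFS m n D Q hD = pvBFS m n D' Q' hD' := by
  subst hDe; subst hQe; rfl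

theorem pvBFS_inv (L : List (Int × Int)) (m n : Int)
    (hLin : ∀ q ∈ L, pvInb m n q) (hLne : L ≠ []) :
    ∀ (N : Nat) (D : (Int × Int) → Int) (Q : List (Int × Int)) (hD : ∀ c, -1 ≤ D c),
      Q.length + 2 * pvUncount m n D ≤ N → pvInv L m n D Q →
      pvInv L m n (pvBFS m n D Q hD) [] := by
  intro N
  induction N with
  | zero =>
    intro D Q hD hle hinv
    cases Q with
    | nil => simp only [pvBFS]; exact hinv
    | cons c Q' => simp only [List.length_cons] at hle; omega
  | succ N ih =>
    intro D Q hD hle hinv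
    cases Q with
    | nil => simp only [pvBFS]; exact hinv
    | cons c Q' =>
      rw [pvBFS]
      have hstep := pvStep_eq m n (D c) c D Q'
      have hD' : ∀ c', -1 ≤ (fun c' => if c' ∈ (pvNbrs c).filter (pvOk m n D) then D c + 1 else D c') c' := by
        intro c'
        by_cases h : c' ∈ (pvNbrs c).filter (pvOk m n D)
        · simp only [if_pos h]; have := hD c; omega
        · simp only [if_neg h]; exact hD c'
      rw [pvBFS_congr m n _ _ _ _ (congrArg Prod.fst hstep) (congrArg Prod.snd hstep) _ hD']
      have hdec := pvMeasure_dec m n (D c) (hD c) D ((pvNbrs c).filter (pvOk m n D))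
        ((pvNbrs_nodup c).filter _) (fun t ht => (List.mem_filter.1 ht).2)
      refine ih _ _ hD' ?_ (pvInv_step L m n hLin hLne D c Q' hinv)
      simp only [List.length_append, List.length_cons] at hle ⊢
      omega

theorem pvInit_foldl (m n : Int) (ls : List (Int × Int))
    (D : (Int × Int) → Int) (Q : List (Int × Int)) :
    ls.foldl
      (fun (s : ((Int × Int) → Int) × List (Int × Int)) (p : Int × Int) =>
        if 0 ≤ p.1 ∧ p.1 < m ∧ 0 ≤ p.2 ∧ p.2 < n then
          (fun c => if c = p then 0 else s.1 c, s.2 ++ [p])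
        else s) (D, Q) =
    (fun c => if c ∈ ls.filter (fun p => decide (0 ≤ p.1 ∧ p.1 < m ∧ 0 ≤ p.2 ∧ p.2 < n)) then 0 else D c,
     Q ++ ls.filter (fun p => decide (0 ≤ p.1 ∧ p.1 < m ∧ 0 ≤ p.2 ∧ p.2 < n))) := by
  induction ls generalizing D Q with
  | nil => simp
  | cons p ls ih =>
    rw [List.foldl_cons]
    by_cases hp : 0 ≤ p.1 ∧ p.1 < m ∧ 0 ≤ p.2 ∧ p.2 < n
    · rw [if_pos hp, ih]
      have hfc : (p :: ls).filter (fun p => decide (0 ≤ p.1 ∧ p.1 < m ∧ 0 ≤ p.2 ∧ p.2 < n)) =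
          p :: ls.filter (fun p => decide (0 ≤ p.1 ∧ p.1 < m ∧ 0 ≤ p.2 ∧ p.2 < n)) := by
        simp [List.filter_cons, hp]
      rw [hfc]
      refine Prod.ext ?_ ?_
      · funext c
        show (if c ∈ ls.filter (fun p => decide (0 ≤ p.1 ∧ p.1 < m ∧ 0 ≤ p.2 ∧ p.2 < n)) then (0 : Int)
              else if c = p then 0 else D c) =
            (if c ∈ p :: ls.filter (fun p => decide (0 ≤ p.1 ∧ p.1 < m ∧ 0 ≤ p.2 ∧ p.2 < n)) then (0 : Int)
              else D c)
        by_cases hc : c ∈ ls.filter (fun p => decide (0 ≤ p.1 ∧ p.1 < m ∧ 0 ≤ p.2 ∧ p.2 < n))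
        · rw [if_pos hc, if_pos (List.mem_cons_of_mem _ hc)]
        · by_cases hcp : c = p
          · rw [if_neg hc, if_pos hcp, if_pos (by rw [hcp]; exact List.mem_cons_self)]
          · rw [if_neg hc, if_neg hcp, if_neg (by
              intro hmem
              rcases List.mem_cons.1 hmem with h1 | h1
              exacts [hcp h1, hc h1])]
      · simp
    · rw [if_neg hp, ih]
      have hfc : (p :: ls).filter (fun p => decide (0 ≤ p.1 ∧ p.1 < m ∧ 0 ≤ p.2 ∧ p.2 < n)) =
          ls.filter (fun p => decide (0 ≤ p.1 ∧ p.1 < m ∧ 0 ≤ p.2 ∧ p.2 < n)) := by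
        simp [List.filter_cons, hp]
      rw [hfc]

theorem pvInit_eq (m n : Int) (ls : List (Int × Int)) :
    pvInit m n ls =
    (fun c => if c ∈ ls.filter (fun p => decide (0 ≤ p.1 ∧ p.1 < m ∧ 0 ≤ p.2 ∧ p.2 < n)) then 0 else -1,
     ls.filter (fun p => decide (0 ≤ p.1 ∧ p.1 < m ∧ 0 ≤ p.2 ∧ p.2 < n))) := by
  have h := pvInit_foldl m n ls (fun _ => -1) []
  simpa [pvInit] using h

theorem pvInv_init (m n : Int) (L : List (Int × Int)) (hLin : ∀ q ∈ L, pvInb m n q) :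
    pvInv L m n (fun c => if c ∈ L then 0 else -1) L := by
  refine ⟨?_, ?_, ?_, ?_, ?_, ?_⟩
  · intro c hc; simp [hc]
  · intro c hc
    by_cases hcL : c ∈ L
    · simp only [if_pos hcL]
      refine ⟨hLin c hcL, le_refl 0, ?_⟩
      have := pvMinDist_le L c c hcL
      simp at this
      omega
    · simp [hcL] at hc
  · intro c hc hcQ
    by_cases hcL : c ∈ L
    · exact absurd hcL hcQ
    · simp [hcL] at hc
  · intro c hc; simp [hc]
  · refine List.pairwise_of_forall_mem_list ?_
    intro a ha b hb
    simp [ha, hb]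
  · intro c hc h hm
    simp only [if_pos hm]
    by_cases hcL : c ∈ L
    · simp [hcL]
    · simp [hcL] at hc

theorem pvFinal (L : List (Int × Int)) (m n : Int)
    (hLin : ∀ q ∈ L, pvInb m n q) (hLne : L ≠ []) (D : (Int × Int) → Int)
    (h1 : ∀ c ∈ L, D c = 0)
    (h2 : ∀ c, D c ≠ -1 → pvInb m n c ∧ 0 ≤ D c ∧ pvMinDist L c ≤ D c)
    (h3 : ∀ c, D c ≠ -1 → c ∉ ([] : List (Int × Int)) → ∀ d ∈ pvDirs,
        pvInb m n (c.1 + d.1, c.2 + d.2) →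
        D (c.1 + d.1, c.2 + d.2) ≠ -1 ∧ D (c.1 + d.1, c.2 + d.2) ≤ D c + 1) :
    ∀ c, pvInb m n c → D c = pvMinDist L c := by
  have key : ∀ (k : Nat) (c : Int × Int), pvInb m n c → (pvMinDist L c).toNat ≤ k →
      D c ≠ -1 ∧ D c ≤ pvMinDist L c := by
    intro k
    induction k with
    | zero =>
      intro c hc hk
      have hnn := pvMinDist_nonneg L c hLne
      have h0 : pvMinDist L c = 0 := by omega
      have hcL := pvMinDist_zero L c hLne h0
      rw [h1 c hcL, h0]
      exact ⟨by decide, le_refl 0⟩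
    | succ k ih =>
      intro c hc hk
      by_cases hz : pvMinDist L c = 0
      · have hcL := pvMinDist_zero L c hLne hz
        rw [h1 c hcL, hz]
        exact ⟨by decide, le_refl 0⟩
      · have hnn := pvMinDist_nonneg L c hLne
        have hpos : 0 < pvMinDist L c := by omega
        obtain ⟨u, _, ⟨d, hd, hcu⟩, huin, humd⟩ := pvMd_step L m n hLin hLne c hc hpos
        have hku : (pvMinDist L u).toNat ≤ k := by
          have := pvMinDist_nonneg L u hLne
          omega
        obtain ⟨hune, hule⟩ := ih u huin hku
        have huval : D u = pvMinDist L u := le_antisymm hule (h2 u hune).2.2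
        have h3u := h3 u hune (List.not_mem_nil) d hd (by rw [← hcu]; exact hc)
        rw [← hcu] at h3u
        exact ⟨h3u.1, by omega⟩
  intro c hc
  obtain ⟨hne, hle⟩ := key (pvMinDist L c).toNat c hc (le_refl _)
  exact le_antisymm hle (h2 c hne).2.2

-- the whole pipeline, for a nonempty grid
theorem pvMain (m n : Int) (lockers : List (Int × Int)) (hm : 0 < m) (hn : 0 < n) :
    (List.range m.toNat).map (fun (i : Nat) => (List.range n.toNat).map (fun (j : Nat) =>
        pvBFS m n (pvInit m n lockers).1 (pvInit m n lockers).2 (pvInit_ge m n lockers)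
          ((i : Int), (j : Int)))) =
    (if lockers.filter (fun p => decide (0 ≤ p.1 ∧ p.1 < m ∧ 0 ≤ p.2 ∧ p.2 < n)) = [] then
      List.replicate m.toNat (List.replicate n.toNat (-1))
     else
      (List.range m.toNat).map (fun (i : Nat) => (List.range n.toNat).map (fun (j : Nat) =>
        pvMinDist (lockers.filter (fun p => decide (0 ≤ p.1 ∧ p.1 < m ∧ 0 ≤ p.2 ∧ p.2 < n)))
          ((i : Int), (j : Int))))) := by
  set L := lockers.filter (fun p => decide (0 ≤ p.1 ∧ p.1 < m ∧ 0 ≤ p.2 ∧ p.2 < n)) with hLdef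
  have hD0 : ∀ c, -1 ≤ (fun c => if c ∈ L then (0 : Int) else -1) c := by
    intro c
    by_cases h : c ∈ L <;> simp [h]
  have hE := pvInit_eq m n lockers
  have hDf : pvBFS m n (pvInit m n lockers).1 (pvInit m n lockers).2 (pvInit_ge m n lockers) =
      pvBFS m n (fun c => if c ∈ L then 0 else -1) L hD0 :=
    pvBFS_congr m n _ _ _ _ (congrArg Prod.fst hE) (congrArg Prod.snd hE) _ hD0
  rw [hDf]
  by_cases hLe : L = []
  · rw [if_pos hLe]
    rw [pvBFS_congr m n _ _ L [] rfl hLe hD0 (by intro c; by_cases h : c ∈ L <;> simp [h])]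
    simp only [pvBFS]
    refine List.ext_getElem (by simp) ?_
    intro i hi1 hi2
    simp only [List.getElem_map, List.getElem_range, List.getElem_replicate]
    refine List.ext_getElem (by simp) ?_
    intro j hj1 hj2
    simp [hLe]
  · rw [if_neg hLe]
    have hLin : ∀ q ∈ L, pvInb m n q := by
      intro q hq
      have := (List.mem_filter.1 hq).2
      simp only [decide_eq_true_eq] at this
      exact this
    have hinv := pvBFS_inv L m n hLin hLe (L.length + 2 * pvUncount m n (fun c => if c ∈ L then 0 else -1))
      (fun c => if c ∈ L then 0 else -1) L hD0 (le_refl _) (pvInv_init m n L hLin)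
    obtain ⟨f1, f2, f3, _, _, _⟩ := hinv
    have hfin := pvFinal L m n hLin hLe _ f1 f2 f3
    refine List.map_congr_left ?_
    intro i hi
    refine List.map_congr_left ?_
    intro j hj
    refine hfin _ ?_
    simp only [List.mem_range] at hi hj
    exact ⟨(by omega : (0:Int) ≤ (i : Int)), (by omega : (i : Int) < m),
      (by omega : (0:Int) ≤ (j : Int)), (by omega : (j : Int) < n)⟩

theorem compute_distance_to_lockers_spec : Claim_equal_compute_distance_to_lockers := by
  intro city lockers _
  unfold Spec_compute_distance_to_lockers
  cases city with
  | nil => rfl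
  | cons r0 rest =>
    by_cases hr0 : r0 = []
    · simp only [compute_distance_to_lockers, compute_distance_to_lockers_alt, if_pos hr0]
    · simp only [compute_distance_to_lockers, compute_distance_to_lockers_alt, if_neg hr0]
      refine pvMain ((r0 :: rest).length : Int) (r0.length : Int) lockers ?_ ?_
      · simp only [List.length_cons]
        omega
      · have : r0.length ≠ 0 := fun h => hr0 (List.eq_nil_of_length_eq_zero h)
        omega
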